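-- pv_equiv track=rewrite | github.com/Dakin98/Brain | workspace-ops/skills/n8n/scripts/export_docs.py | _generate_flow_diagram
-- ===== SOURCE A (Python) =====
-- def _generate_flow_diagram(nodes, connections):
--     """Generate ASCII flow diagram"""
--     lines = []
--
--     # Build a simple representation
--     lines.append("Flow:")
--
--     # Find trigger nodes (starting points)
--     trigger_names = [n['name'] for n in nodes if 'trigger' in n.get('type', '').lower()]
--
--     if trigger_names:
--         lines.append(f"  [Trigger] {' -> '.join(trigger_names[:3])}")
--
--     # Follow connections
--     processed = set()
--
--     def follow_flow(node_name, depth=0):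
--         if node_name in processed or depth > 10:
--             return
--         processed.add(node_name)
--
--         node_conns = connections.get(node_name, {})
--         if isinstance(node_conns, dict):
--             for output_type, targets in node_conns.items():
--                 if isinstance(targets, list):
--                     for target in targets:
--                         if isinstance(target, list) and len(target) > 0:
--                             target_node = target[0].get('node', 'Unknown')
--                             lines.append(f"  {'  ' * depth}{node_name} -> {target_node}")
--                             follow_flow(target_node, depth + 1)
--
--     for trigger in trigger_names:
--         follow_flow(trigger)
--
--     return lines
-- ===== SOURCE B (Python) =====
-- def _generate_flow_diagram(nodes, connections):
--     """Generate ASCII flow diagram (iterative: explicit work stack instead of recursion)"""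
--     lines = ["Flow:"]
--
--     trigger_names = [n['name'] for n in nodes if 'trigger' in n.get('type', '').lower()]
--
--     if trigger_names:
--         lines.append(f"  [Trigger] {' -> '.join(trigger_names[:3])}")
--
--     processed = set()
--     # Stack of frames: ('visit', name, depth) or ('emit', line); triggers reversed so
--     # the first trigger is on top and is explored first.
--     stack = [('visit', t, 0) for t in reversed(trigger_names)]
--     while stack:
--         frame = stack.pop()
--         if frame[0] == 'emit':
--             lines.append(frame[1])
--             continue
--         _, name, depth = frame
--         if name in processed or depth > 10:
--             continue
--         processed.add(name)
--         edges = []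
--         for output_type, targets in connections.get(name, {}).items():
--             if isinstance(targets, list):
--                 for target in targets:
--                     if isinstance(target, list) and len(target) > 0:
--                         tn = target[0].get('node', 'Unknown')
--                         edges.append((f"  {'  ' * depth}{name} -> {tn}", tn))
--         # Reverse-push so edge 0 is handled first; for each edge the line is
--         # emitted before its target's subtree is visited.
--         for line, tn in reversed(edges):
--             stack.append(('visit', tn, depth + 1))
--             stack.append(('emit', line))
--     return lines
-- ===== Notes on version B (the rewrite author's own statement) =====
-- stated objective: alternative
-- what changed: A's recursive follow_flow DFS is replaced by an iterative while loop over an explicit work stack of visit/emit frames (edges reverse-pushed so the pre-order interleaving of lines and subtrees is preserved).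
import Mathlib
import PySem

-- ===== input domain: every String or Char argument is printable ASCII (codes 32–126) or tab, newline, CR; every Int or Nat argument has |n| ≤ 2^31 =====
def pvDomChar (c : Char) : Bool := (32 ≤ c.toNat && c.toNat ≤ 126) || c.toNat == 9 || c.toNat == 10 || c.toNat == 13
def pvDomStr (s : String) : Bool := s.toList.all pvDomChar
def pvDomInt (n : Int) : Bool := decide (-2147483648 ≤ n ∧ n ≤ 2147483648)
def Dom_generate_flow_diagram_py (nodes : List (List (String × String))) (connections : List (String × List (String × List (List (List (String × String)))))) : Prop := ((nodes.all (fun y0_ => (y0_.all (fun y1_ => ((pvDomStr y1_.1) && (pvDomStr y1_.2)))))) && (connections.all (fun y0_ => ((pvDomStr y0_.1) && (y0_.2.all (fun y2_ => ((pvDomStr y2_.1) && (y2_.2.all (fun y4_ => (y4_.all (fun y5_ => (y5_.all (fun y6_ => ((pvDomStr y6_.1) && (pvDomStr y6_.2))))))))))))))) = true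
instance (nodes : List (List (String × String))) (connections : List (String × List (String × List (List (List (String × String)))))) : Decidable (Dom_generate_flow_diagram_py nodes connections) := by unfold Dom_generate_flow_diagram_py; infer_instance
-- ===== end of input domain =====

-- B replaces A's recursive `follow_flow` DFS with an explicit work stack of
-- visit/emit frames (an iterative decomposition of the same traversal); same return value.

-- ===== PORT A =====
-- shared helpers: both Pythons build the trigger list, the header lines, the
-- per-node edge list and the emitted line strings with literally identical code.

-- [n['name'] for n in nodes if 'trigger' in n.get('type', '').lower()]
-- (n['name'] ported as getD with default ""; Pre_ excludes the KeyError inputs where it fires)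
def pvTriggers (nodes : List (List (String × String))) : List String :=
  (nodes.filter (fun n =>
      PySem.Str.isIn "trigger" (PySem.Str.lower (PySem.Dict.getD (PySem.Dict.ofList n) "type" "")))).map
    (fun n => PySem.Dict.getD (PySem.Dict.ofList n) "name" "")

-- lines = ["Flow:"]; if trigger_names: lines.append("  [Trigger] " + " -> ".join(trigger_names[:3]))
def pvHeaderLines (nodes : List (List (String × String))) : List String :=
  let ts := pvTriggers nodes
  if ts.isEmpty then ["Flow:"]
  else ["Flow:", "  [Trigger] " ++ PySem.Str.join " -> " (PySem.List.slice ts none (some 3))]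

-- f"  {'  ' * depth}{node_name} -> {target_node}"; hand port: '  '*depth is 2*depth
-- spaces (depth ≥ 0 always in this program), f-string is concatenation — exact here.
def pvLine (name : String) (depth : Nat) (tn : String) : String :=
  "  " ++ String.ofList (List.replicate (2 * depth) ' ') ++ name ++ " -> " ++ tn

-- the targets reached from `name`, in A's iteration order: connections.get(name, {})
-- .items(), each targets list, keeping non-empty target lists, target[0].get('node','Unknown')
def pvEdges (connections : List (String × List (String × List (List (List (String × String)))))) (name : String) : List String :=
  (PySem.Dict.items (PySem.Dict.ofList (PySem.Dict.getD (PySem.Dict.ofList connections) name []))).flatMap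
    (fun p => p.2.filterMap (fun target =>
      match target with
      | [] => none
      | d :: _ => some (PySem.Dict.getD (PySem.Dict.ofList d) "node" "Unknown")))

-- the inner `for output_type, targets … for target in targets` loop body of follow_flow:
-- append the line, then recurse into the target (f is the recursive call)
def pvFoldEdges (f : String → (List String × PySem.Set String) → (List String × PySem.Set String))
    (name : String) (depth : Nat) :
    List String → (List String × PySem.Set String) → (List String × PySem.Set String)
  | [], st => st
  | tn :: rest, st => pvFoldEdges f name depth rest (f tn (st.1 ++ [pvLine name depth tn], st.2))

-- follow_flow; state = (lines, processed). fuel is only a totality guard: called with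
-- fuel = 12 at depth 0 and decremented as depth grows, so `depth > 10` always returns
-- before fuel can reach 0 and the fuel-0 branch is never taken.
def pvFollowA (connections : List (String × List (String × List (List (List (String × String)))))) :
    Nat → String → Nat → (List String × PySem.Set String) → (List String × PySem.Set String)
  | 0, _, _, st => st
  | fuel + 1, name, depth, st =>
    if PySem.Set.contains st.2 name || decide (10 < depth) then st
    else pvFoldEdges (fun tn st' => pvFollowA connections fuel tn (depth + 1) st')
           name depth (pvEdges connections name) (st.1, PySem.Set.add st.2 name)

def generate_flow_diagram_py (nodes : List (List (String × String))) (connections : List (String × List (String × List (List (List (String × String)))))) : List String :=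
  ((pvTriggers nodes).foldl (fun st t => pvFollowA connections 12 t 0 st)
    (pvHeaderLines nodes, (PySem.Set.empty : PySem.Set String))).1

-- ===== PORT B =====
-- a stack frame of B's while loop: ('emit', line) or ('visit', name, depth)
inductive PvFrame
  | emit : String → PvFrame
  | visit : String → Nat → PvFrame
deriving DecidableEq, Repr

-- the frames B pushes (reversed edges, visit under emit): in pop order, i.e. with the
-- top of the Python stack as the HEAD of the Lean list, that is
-- emit line0, visit tn0, emit line1, visit tn1, …
def pvInterleave (name : String) (depth : Nat) (edges : List String) : List PvFrame :=
  edges.flatMap (fun tn => [PvFrame.emit (pvLine name depth tn), PvFrame.visit tn (depth + 1)])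

-- termination bookkeeping for B's while loop (not part of the computation):
-- pvRawCount bounds how many edges any single visit can push, pvPot/pvMeasure is the
-- standard exponential potential of a depth-bounded DFS stack.
def pvRawCount (connections : List (String × List (String × List (List (List (String × String)))))) : Nat :=
  (connections.map (fun p => ((p.2.map (fun q => q.2.length)).sum))).sum

def pvPot (C : Nat) : PvFrame → Nat
  | .emit _ => 1
  | .visit _ d => C ^ (12 - d)

def pvMeasure (C : Nat) (fs : List PvFrame) : Nat := (fs.map (pvPot C)).sum

-- items of a dict built from an association list are pairs of that list
theorem pv_mem_items_update {V : Type} (l : List (String × V)) (d : PySem.Dict String V)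
    (p : String × V) (h : p ∈ (PySem.Dict.update d l).items) : p ∈ d.items ∨ p ∈ l := by
  induction l generalizing d with
  | nil => exact Or.inl h
  | cons q rest ih =>
    rcases ih (d.insert q.1 q.2) h with h' | h'
    · rcases (PySem.Dict.mem_items_insert d q.1 q.2 p).1 h' with h'' | h''
      · right; simp [h'']
      · exact Or.inl h''.1
    · right; exact List.mem_cons_of_mem _ h'

theorem pv_mem_items_ofList {V : Type} (l : List (String × V)) (p : String × V)
    (h : p ∈ (PySem.Dict.ofList l).items) : p ∈ l := by
  rcases pv_mem_items_update l PySem.Dict.empty p h with h' | h'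
  · simp [PySem.Dict.empty] at h'
  · exact h'

theorem pv_subperm_sum_le {α : Type} (f : α → Nat) {l₁ l₂ : List α} (h : l₁.Subperm l₂) :
    (l₁.map f).sum ≤ (l₂.map f).sum := by
  obtain ⟨l, hp, hs⟩ := h
  calc (l₁.map f).sum = (l.map f).sum := ((hp.map f).sum_eq).symm
    _ ≤ (l₂.map f).sum := (hs.map f).sum_le_sum (by simp)

theorem pv_sum_items_ofList_le {V : Type} (l : List (String × V)) (f : String × V → Nat) :
    (((PySem.Dict.ofList l).items).map f).sum ≤ (l.map f).sum := by
  apply pv_subperm_sum_le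
  have hnk : ((PySem.Dict.ofList l).items.map (fun x => x.1)).Nodup := by
    have := PySem.Dict.nodup_keys_ofList (κ := String) (ν := V) l
    simpa [PySem.Dict.keys] using this
  exact (List.Nodup.of_map _ hnk).subperm (fun p hp => pv_mem_items_ofList l p hp)

theorem pv_le_sum {α : Type} (f : α → Nat) (l : List α) (x : α) (hx : x ∈ l) :
    f x ≤ (l.map f).sum := by
  induction l with
  | nil => cases hx
  | cons a rest ih =>
    rcases hx with _ | hx
    · simp
    · simpa using Nat.le_add_left _ _ |>.trans (Nat.add_le_add_left (ih ‹x ∈ rest›) _)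

-- any node's edge list is no longer than the raw target count of the whole input
theorem pvEdges_le (connections : List (String × List (String × List (List (List (String × String)))))) (name : String) :
    (pvEdges connections name).length ≤ pvRawCount connections := by
  unfold pvEdges
  rw [List.length_flatMap]
  have h1 : ((PySem.Dict.items (PySem.Dict.ofList (PySem.Dict.getD (PySem.Dict.ofList connections) name []))).map
        (fun p => (p.2.filterMap (fun target =>
          match target with
          | [] => none
          | d :: _ => some (PySem.Dict.getD (PySem.Dict.ofList d) "node" "Unknown"))).length)).sum
      ≤ ((PySem.Dict.items (PySem.Dict.ofList (PySem.Dict.getD (PySem.Dict.ofList connections) name []))).map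
        (fun p => p.2.length)).sum := by
    apply List.sum_le_sum
    intro p _
    exact List.length_filterMap_le _ _
  refine h1.trans ?_
  have h2 := pv_sum_items_ofList_le (PySem.Dict.getD (PySem.Dict.ofList connections) name [])
      (fun p => p.2.length)
  refine h2.trans ?_
  rcases hv : (PySem.Dict.ofList connections).get? name with _ | v
  · simp [PySem.Dict.getD_eq_get?_getD, hv]
  · rw [PySem.Dict.getD_eq_get?_getD, hv]
    have hm : (name, v) ∈ connections :=
      pv_mem_items_ofList connections (name, v) (PySem.Dict.mem_items_of_get?_eq_some _ hv)
    have := pv_le_sum (fun p => ((p.2.map (fun q => q.2.length)).sum)) connections (name, v) hm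
    simpa [pvRawCount, List.map_map, Function.comp] using this

-- measure of the pushed frames of one visit
theorem pvMeasure_interleave (C : Nat) (name : String) (depth : Nat) (edges : List String) :
    pvMeasure C (pvInterleave name depth edges) = edges.length * (1 + C ^ (12 - (depth + 1))) := by
  induction edges with
  | nil => simp [pvMeasure, pvInterleave]
  | cons tn rest ih =>
    simp only [pvMeasure, pvInterleave, List.flatMap_cons, List.map_append, List.map_cons,
      List.map_nil, List.sum_append, List.sum_cons, List.sum_nil, pvPot, List.length_cons] at ih ⊢
    rw [Nat.succ_mul]
    omega

theorem pvMeasure_append (C : Nat) (fs gs : List PvFrame) :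
    pvMeasure C (fs ++ gs) = pvMeasure C fs + pvMeasure C gs := by
  simp [pvMeasure]

-- the potential strictly drops when a productive visit (depth ≤ 10) is expanded
theorem pv_pot_drop (R depth E : Nat) (hE : E ≤ R) (hd : depth ≤ 10) :
    E * (1 + (2 * R + 2) ^ (12 - (depth + 1))) < (2 * R + 2) ^ (12 - depth) := by
  set C := 2 * R + 2 with hC
  have hk : 12 - depth = (12 - (depth + 1)) + 1 := by omega
  set k := 12 - (depth + 1) with hk'
  have h1 : 1 ≤ C ^ k := Nat.one_le_pow _ _ (by omega)
  rw [hk, pow_succ]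
  calc E * (1 + C ^ k) ≤ R * (1 + C ^ k) := Nat.mul_le_mul_right _ hE
    _ ≤ R * (C ^ k + C ^ k) := Nat.mul_le_mul_left _ (by omega)
    _ = C ^ k * (2 * R) := by ring
    _ < C ^ k * C := by
        have h2 : 2 * R < C := by omega
        exact mul_lt_mul_of_pos_left h2 (by positivity)

-- B's while loop; the Lean list holds the Python stack TOP-FIRST, so a pop is a
-- head match and a push is a cons (pvInterleave is the pushed block in pop order).
def pvRunB (connections : List (String × List (String × List (List (List (String × String))))))
    (stack : List PvFrame) (lines : List String) (processed : PySem.Set String) : List String :=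
  match stack with
  | [] => lines
  | .emit s :: fs => pvRunB connections fs (lines ++ [s]) processed
  | .visit name depth :: fs =>
    if PySem.Set.contains processed name || decide (10 < depth) then
      pvRunB connections fs lines processed
    else
      pvRunB connections (pvInterleave name depth (pvEdges connections name) ++ fs)
        lines (PySem.Set.add processed name)
termination_by pvMeasure (2 * pvRawCount connections + 2) stack
decreasing_by
  · simp [pvMeasure, pvPot]
  · simp only [pvMeasure, List.map_cons, List.sum_cons, pvPot]
    have : 1 ≤ (2 * pvRawCount connections + 2) ^ (12 - depth) := Nat.one_le_pow _ _ (by omega)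
    omega
  · rename_i hg
    rw [pvMeasure_append, pvMeasure_interleave]
    simp only [pvMeasure, List.map_cons, List.sum_cons, pvPot]
    have hd : depth ≤ 10 := by
      by_contra hlt
      simp [decide_eq_true (by omega : 10 < depth)] at hg
    have := pv_pot_drop (pvRawCount connections) depth (pvEdges connections name).length
      (pvEdges_le connections name) hd
    omega

def generate_flow_diagram_py_alt (nodes : List (List (String × String))) (connections : List (String × List (String × List (List (List (String × String)))))) : List String :=
  -- stack = [('visit', t, 0) for t in reversed(trigger_names)], popped from the end:
  -- top-first that is one 'visit' frame per trigger in original order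
  pvRunB connections ((pvTriggers nodes).map (fun t => PvFrame.visit t 0))
    (pvHeaderLines nodes) (PySem.Set.empty : PySem.Set String)

-- ===== PRECONDITION & SPEC =====
-- Pre_ excludes inputs where some trigger-typed node dict has no 'name' key: there
-- `n['name']` raises KeyError in A (and in B, which runs the same comprehension).
def Pre_generate_flow_diagram_py (nodes : List (List (String × String))) (connections : List (String × List (String × List (List (List (String × String)))))) : Prop :=
  ∀ n ∈ nodes,
    PySem.Str.isIn "trigger" (PySem.Str.lower (PySem.Dict.getD (PySem.Dict.ofList n) "type" "")) = true →
    PySem.Dict.contains (PySem.Dict.ofList n) "name" = true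
instance (nodes : List (List (String × String))) (connections : List (String × List (String × List (List (List (String × String)))))) : Decidable (Pre_generate_flow_diagram_py nodes connections) := by unfold Pre_generate_flow_diagram_py; infer_instance

def pvWitness_generate_flow_diagram_py : (List (List (String × String))) × (List (String × List (String × List (List (List (String × String)))))) :=
  ([[("name", "W"), ("type", "manualTrigger")]], [("W", [("main", [[[("node", "B")]]])])])

def Spec_generate_flow_diagram_py (nodes : List (List (String × String))) (connections : List (String × List (String × List (List (List (String × String)))))) (out : List String) : Prop := out = generate_flow_diagram_py_alt nodes connections
instance (nodes : List (List (String × String))) (connections : List (String × List (String × List (List (List (String × String)))))) (out : List String) : Decidable (Spec_generate_flow_diagram_py nodes connections out) := by unfold Spec_generate_flow_diagram_py; infer_instance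

-- ===== CLAIM (what is proved, stated in full; the proofs are below) =====
def Claim_equal_generate_flow_diagram_py : Prop := ∀ (nodes : List (List (String × String))) (connections : List (String × List (String × List (List (List (String × String)))))), Dom_generate_flow_diagram_py nodes connections → Pre_generate_flow_diagram_py nodes connections → Spec_generate_flow_diagram_py nodes connections (generate_flow_diagram_py nodes connections)

-- ===== LEMMAS AND PROOFS =====

-- popping one visit frame runs A's follow_flow on the state and leaves the rest
-- of the stack untouched (fuel large enough that A's fuel guard never fires)
theorem pvRunB_visit (connections : List (String × List (String × List (List (List (String × String)))))) :
    ∀ (fuel : Nat) (name : String) (depth : Nat) (lines : List String)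
      (proc : PySem.Set String) (fs : List PvFrame), 12 ≤ depth + fuel →
      pvRunB connections (PvFrame.visit name depth :: fs) lines proc
        = pvRunB connections fs (pvFollowA connections fuel name depth (lines, proc)).1
            (pvFollowA connections fuel name depth (lines, proc)).2 := by
  intro fuel
  induction fuel with
  | zero =>
    intro name depth lines proc fs h
    have hd : 10 < depth := by omega
    rw [pvRunB]
    simp [pvFollowA, hd]
  | succ fuel ih =>
    intro name depth lines proc fs h
    have hstep : ∀ (edges : List String) (l : List String) (p : PySem.Set String)
        (gs : List PvFrame),
        pvRunB connections (pvInterleave name depth edges ++ gs) l p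
          = pvRunB connections gs
              (pvFoldEdges (fun tn st' => pvFollowA connections fuel tn (depth + 1) st')
                name depth edges (l, p)).1
              (pvFoldEdges (fun tn st' => pvFollowA connections fuel tn (depth + 1) st')
                name depth edges (l, p)).2 := by
      intro edges
      induction edges with
      | nil => intro l p gs; simp [pvInterleave, pvFoldEdges]
      | cons tn rest ihe =>
        intro l p gs
        have h1 : pvInterleave name depth (tn :: rest) ++ gs
            = PvFrame.emit (pvLine name depth tn) :: PvFrame.visit tn (depth + 1)
              :: (pvInterleave name depth rest ++ gs) := by
          simp [pvInterleave, List.flatMap_cons]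
        rw [h1, pvRunB]
        rw [ih tn (depth + 1) (l ++ [pvLine name depth tn]) p
          (pvInterleave name depth rest ++ gs) (by omega)]
        rw [ihe]
        simp [pvFoldEdges]
    by_cases hg : name ∈ proc ∨ 10 < depth
    · rw [pvRunB]
      simp [pvFollowA, hg]
    · rw [pvRunB]
      simp only [pvFollowA]
      simp [hg]
      rw [hstep]

-- the whole stack of trigger visits runs A's trigger loop
theorem pvRunB_triggers (connections : List (String × List (String × List (List (List (String × String)))))) :
    ∀ (ts : List String) (lines : List String) (proc : PySem.Set String),
      pvRunB connections (ts.map (fun t => PvFrame.visit t 0)) lines proc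
        = (ts.foldl (fun st t => pvFollowA connections 12 t 0 st) (lines, proc)).1 := by
  intro ts
  induction ts with
  | nil => intro lines proc; simp [pvRunB]
  | cons t rest ih =>
    intro lines proc
    rw [List.map_cons, pvRunB_visit connections 12 t 0 lines proc _ (by omega)]
    rw [ih]
    simp

-- ===== VERDICT (by name: the statement is the Claim_ definition above) =====
theorem generate_flow_diagram_py_spec : Claim_equal_generate_flow_diagram_py := by
  intro nodes connections _ _
  unfold Spec_generate_flow_diagram_py generate_flow_diagram_py generate_flow_diagram_py_alt
  exact (pvRunB_triggers connections (pvTriggers nodes) (pvHeaderLines nodes) PySem.Set.empty).symm
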